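-- pv_equiv track=rewrite | github.com/Oliwierostasz/projet-ISN-candy | main_code.py | recherche_combinaison_grille
-- ===== SOURCE A (Python) =====
-- def scotch(grille):
--     """à patir d'une grille donnée, renvoie cette même grille entouré d'un scotch(de 0)
--     """
--     grille_scotch=[]
--     ligne=[]
--     for i in range (len(grille)+2):
--         ligne.append(0)
--     grille_scotch.append(ligne)
--     ligne_s=[]
--     for i in range (len(grille)):
--         ligne_s.append(0)
--         for j in range(len(grille)):
--             ligne_s.append(grille[i][j])
--         ligne_s.append(0)
--         grille_scotch.append(ligne_s)
--         ligne_s=[]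
--     grille_scotch.append(ligne)
--     return (grille_scotch)
--
-- def detecte_coordonnees_combinaison(grille,i,j):
--     """Renvoie une liste contenant les coordonnées de tout
--     les bonbons appartenant à la combinaison du bonbon (i,j)
--     """
--     ##on utilise i et j pour la grille sans scotch et ibis et jbis sont les meme bonbon mais pour la grille avec scotch
--     ##ajout du scotch à la grille donné
--     grille_combi=scotch(grille)
--     ##comme grille entourée du scotch, on rajoute +1 au coordonnée du bonbon que l'on appelera ibis et jbis
--     ibis=i+1
--     jbis=j+1
--     etat_bonbon=grille_combi[ibis][jbis] ##correspond au nombre que porte la case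
--     liste_combi=[] ##liste combinaison locale
--     liste_combi_f=[]## liste combinaison final
--
--     while ibis>0 and grille_combi[ibis-1][jbis]==etat_bonbon: ##on monte d'abord
--         ibis-=1
--         liste_combi.append([ibis-1,jbis-1])
--     ibis=i+1##on réinitialise ibis a la position du bonbon
--
--     while ibis<(len(grille_combi)-1) and grille_combi[ibis+1][jbis]==etat_bonbon: ##on descend
--         ibis+=1
--         liste_combi.append([ibis-1,jbis-1])
--     ibis=i+1 ##on réinitialise ibis à la position du bonbon
--     if len(liste_combi)<2:
--         liste_combi=[]
--     else:liste_combi_f+=liste_combi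
--
--     liste_combi=[]  ##on réinitialise la liste de combinaison (on s'occupe maitenant de la ligne)
--     while jbis>0 and grille_combi[ibis][jbis-1]==etat_bonbon:## a gauche
--         jbis-=1
--         liste_combi.append([ibis-1,jbis-1])
--
--     jbis=j+1 ##on réinitialise jbis à la position du bonbon
--
--     while jbis<(len(grille_combi)-1) and grille_combi[ibis][jbis+1]==etat_bonbon: ##à droite
--         jbis+=1
--         liste_combi.append([ibis-1,jbis-1])
--     jbis=i+1 ##on réinitialise jbis à la position du bonbon
--     if len(liste_combi)<2:
--         liste_combi=[]
--     else:liste_combi_f+=liste_combi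
--
--
--     if len(liste_combi_f)>=2:
--         liste_combi_f.append([i,j])
--
--     return(liste_combi_f)
--
-- def recherche_combinaison_grille(grille):
--     """
--     fonction qui parcourt toute la grille et trouve toutes les combinaisons pour les mettre dans une liste (ttes_combis), puis
--     parcourt ttes_combis et crée une liste où sont supprimées toutes les coordonnées dupliquées pour que chacune n'apparaisse qu'une fois
--
--     Parameters
--     ----------
--     grille : liste de listes (tableau 2D)
--         la grille de jeu
--
--     Returns
--     -------
--     combis_sans_doubles : liste de listes
--         liste contenant les coordonnées de tous les bonbons impliqués dans une combinaison dans la grille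
--
--     """
--     '''
--     renvoie la liste de listes combis_sans_doubles'''
--     ttes_combis = []
--     for i in range (len(grille)):
--         for j in range(len(grille[i])):
--             ttes_combis += (detecte_coordonnees_combinaison(grille,i,j))
--     combis_sans_doubles = []
--     for coord in ttes_combis :
--         if coord not in combis_sans_doubles :
--             combis_sans_doubles.append(coord)
--     return combis_sans_doubles
-- ===== SOURCE B (Python) =====
-- def _runs_fwd(xs):
--     """res[c] = number of consecutive elements equal to xs[c] immediately before position c."""
--     res = []
--     k = 0
--     prev = None
--     first = True
--     for x in xs:
--         if (not first) and x == prev: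
--             k += 1
--         else:
--             k = 0
--         res.append(k)
--         prev = x
--         first = False
--     return res
--
-- def _runs_bwd(xs):
--     """res[c] = number of consecutive elements equal to xs[c] immediately after position c."""
--     return list(reversed(_runs_fwd(list(reversed(xs)))))
--
-- def recherche_combinaison_grille(grille):
--     n = len(grille)
--     zrow = [0] * (n + 2)
--     P = [zrow] + [[0] + list(row) + [0] for row in grille] + [zrow]
--     m = n + 2
--     left = [_runs_fwd(row) for row in P]
--     right = [_runs_bwd(row) for row in P]
--     cols = [[P[r][c] for r in range(m)] for c in range(m)]
--     up = [_runs_fwd(col) for col in cols]      # up[c][r]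
--     down = [_runs_bwd(col) for col in cols]    # down[c][r]
--     out = []
--     seen = set()
--     for i in range(n):
--         for j in range(n):
--             r, c = i + 1, j + 1
--             au, ad = up[c][r], down[c][r]
--             al, ar = left[r][c], right[r][c]
--             coords = []
--             if au + ad >= 2:
--                 coords += [[i - 1 - t, j] for t in range(au)]
--                 coords += [[i + 1 + t, j] for t in range(ad)]
--             if al + ar >= 2:
--                 coords += [[i, j - 1 - t] for t in range(al)]
--                 coords += [[i, j + 1 + t] for t in range(ar)]
--             if coords:
--                 coords.append([i, j])
--             for cd in coords:
--                 key = (cd[0], cd[1])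
--                 if key not in seen:
--                     seen.add(key)
--                     out.append(cd)
--     return out
-- ===== Notes on version B (the rewrite author's own statement) =====
-- stated objective: faster
-- what changed: A rebuilds the zero-padded grid and re-walks the four run directions cell by cell (O(n^4)) and dedups with a quadratic 'not in list' scan; B builds the padded grid once, precomputes four O(n^2) run-length scan tables (forward/backward over rows and over explicitly built columns), emits each cell's combination block from the tables, and dedups with a seen-set of coordinate pairs.
-- outside the precondition, e.g. on recherche_combinaison_grille([[5, 7]]): A returns [[-1, 1], [1, 1], [0, 1]], B returns []
import Mathlib
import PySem

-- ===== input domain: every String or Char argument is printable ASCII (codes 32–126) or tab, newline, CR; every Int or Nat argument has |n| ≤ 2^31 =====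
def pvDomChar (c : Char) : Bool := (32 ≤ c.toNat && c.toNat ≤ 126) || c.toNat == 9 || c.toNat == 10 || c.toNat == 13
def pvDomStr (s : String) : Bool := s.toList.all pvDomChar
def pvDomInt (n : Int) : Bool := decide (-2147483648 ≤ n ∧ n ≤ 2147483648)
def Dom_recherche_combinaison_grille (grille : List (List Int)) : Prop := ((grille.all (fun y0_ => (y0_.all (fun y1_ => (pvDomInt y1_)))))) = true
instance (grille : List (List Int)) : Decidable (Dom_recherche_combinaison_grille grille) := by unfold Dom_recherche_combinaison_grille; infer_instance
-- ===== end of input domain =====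

-- B replaces A's per-cell rebuild-the-padded-grid-and-walk (O(n^4)) by one padded grid and
-- four run-length scan tables computed once (O(n^2 + output)), with a set-based ordered dedup.

-- ===== PORT A =====

def pvScotch (grille : List (List Int)) : List (List Int) :=
  let ligne := (PySem.List.pyRange 0 ((grille.length : Int) + 2) 1).foldl
    (fun acc _ => acc ++ [(0 : Int)]) []
  let gs := (PySem.List.pyRange 0 (grille.length : Int) 1).foldl (fun acc i =>
    let ls := (PySem.List.pyRange 0 (grille.length : Int) 1).foldl
      (fun l j => l ++ [PySem.List.pyGetD (PySem.List.pyGetD grille i []) j 0]) [(0 : Int)]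
    acc ++ [ls ++ [(0 : Int)]]) [ligne]
  gs ++ [ligne]

-- while ibis>0 and grille_combi[ibis-1][jbis]==etat: ibis-=1; append [ibis-1,jbis-1]
def pvMonte (gc : List (List Int)) (jbis etat ibis : Int) (acc : List (List Int)) :
    Int × List (List Int) :=
  if h : 0 < ibis ∧ PySem.List.pyGetD (PySem.List.pyGetD gc (ibis - 1) []) jbis 0 = etat then
    pvMonte gc jbis etat (ibis - 1) (acc ++ [[ibis - 1 - 1, jbis - 1]])
  else (ibis, acc)
termination_by ibis.toNat
decreasing_by have := h.1; omega

-- while ibis<len(gc)-1 and grille_combi[ibis+1][jbis]==etat: ibis+=1; append [ibis-1,jbis-1]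
def pvDescend (gc : List (List Int)) (jbis etat ibis : Int) (acc : List (List Int)) :
    Int × List (List Int) :=
  if h : ibis < (gc.length : Int) - 1 ∧
      PySem.List.pyGetD (PySem.List.pyGetD gc (ibis + 1) []) jbis 0 = etat then
    pvDescend gc jbis etat (ibis + 1) (acc ++ [[ibis + 1 - 1, jbis - 1]])
  else (ibis, acc)
termination_by ((gc.length : Int) - 1 - ibis).toNat
decreasing_by have := h.1; omega

-- while jbis>0 and grille_combi[ibis][jbis-1]==etat: jbis-=1; append [ibis-1,jbis-1]
def pvGauche (gc : List (List Int)) (ibis etat jbis : Int) (acc : List (List Int)) :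
    Int × List (List Int) :=
  if h : 0 < jbis ∧ PySem.List.pyGetD (PySem.List.pyGetD gc ibis []) (jbis - 1) 0 = etat then
    pvGauche gc ibis etat (jbis - 1) (acc ++ [[ibis - 1, jbis - 1 - 1]])
  else (jbis, acc)
termination_by jbis.toNat
decreasing_by have := h.1; omega

-- while jbis<len(gc)-1 and grille_combi[ibis][jbis+1]==etat: jbis+=1; append [ibis-1,jbis-1]
def pvDroite (gc : List (List Int)) (ibis etat jbis : Int) (acc : List (List Int)) :
    Int × List (List Int) :=
  if h : jbis < (gc.length : Int) - 1 ∧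
      PySem.List.pyGetD (PySem.List.pyGetD gc ibis []) (jbis + 1) 0 = etat then
    pvDroite gc ibis etat (jbis + 1) (acc ++ [[ibis - 1, jbis + 1 - 1]])
  else (jbis, acc)
termination_by ((gc.length : Int) - 1 - jbis).toNat
decreasing_by have := h.1; omega

def pvDetecte (grille : List (List Int)) (i j : Int) : List (List Int) :=
  let gc := pvScotch grille
  let etat := PySem.List.pyGetD (PySem.List.pyGetD gc (i + 1) []) (j + 1) 0
  let lc1 := (pvMonte gc (j + 1) etat (i + 1) []).2
  let lc2 := (pvDescend gc (j + 1) etat (i + 1) lc1).2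
  let lcf1 : List (List Int) := if lc2.length < 2 then [] else [] ++ lc2
  let lc3 := (pvGauche gc (i + 1) etat (j + 1) []).2
  let lc4 := (pvDroite gc (i + 1) etat (j + 1) lc3).2
  let lcf2 := if lc4.length < 2 then lcf1 else lcf1 ++ lc4
  if 2 ≤ lcf2.length then lcf2 ++ [[i, j]] else lcf2

def recherche_combinaison_grille (grille : List (List Int)) : List (List Int) :=
  let ttes := (PySem.List.pyRange 0 (grille.length : Int) 1).foldl (fun acc i =>
    (PySem.List.pyRange 0 (((PySem.List.pyGetD grille i []).length : Int)) 1).foldl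
      (fun acc2 j => acc2 ++ pvDetecte grille i j) acc) []
  ttes.foldl (fun sd coord => if coord ∈ sd then sd else sd ++ [coord]) []

-- ===== PORT B =====

-- res[c] = number of consecutive elements equal to xs[c] immediately before position c
def pvRunsFwd (xs : List Int) : List Int :=
  (xs.foldl (fun (st : List Int × Int × Option Int) x =>
      let k := if st.2.2 = some x then st.2.1 + 1 else 0
      (st.1 ++ [k], k, some x)) ([], 0, none)).1

-- res[c] = number of consecutive elements equal to xs[c] immediately after position c
def pvRunsBwd (xs : List Int) : List Int :=
  (pvRunsFwd xs.reverse).reverse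

def recherche_combinaison_grille_alt (grille : List (List Int)) : List (List Int) :=
  let n := grille.length
  let zrow : List Int := List.replicate (n + 2) 0
  let P : List (List Int) := [zrow] ++ grille.map (fun row => [(0 : Int)] ++ row ++ [0]) ++ [zrow]
  let m : Int := (n : Int) + 2
  let left := P.map pvRunsFwd
  let right := P.map pvRunsBwd
  let cols := (PySem.List.pyRange 0 m 1).map (fun c =>
    (PySem.List.pyRange 0 m 1).map (fun r => PySem.List.pyGetD (PySem.List.pyGetD P r []) c 0))
  let up := cols.map pvRunsFwd
  let down := cols.map pvRunsBwd
  let res := (PySem.List.pyRange 0 (n : Int) 1).foldl (fun st i =>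
    (PySem.List.pyRange 0 (n : Int) 1).foldl
      (fun (st : List (List Int) × PySem.Set (Int × Int)) j =>
        let r := i + 1
        let c := j + 1
        let au := PySem.List.pyGetD (PySem.List.pyGetD up c []) r 0
        let ad := PySem.List.pyGetD (PySem.List.pyGetD down c []) r 0
        let al := PySem.List.pyGetD (PySem.List.pyGetD left r []) c 0
        let ar := PySem.List.pyGetD (PySem.List.pyGetD right r []) c 0
        let coords : List (List Int) :=
          (if 2 ≤ au + ad then
            (PySem.List.pyRange 0 au 1).map (fun t => [i - 1 - t, j]) ++
            (PySem.List.pyRange 0 ad 1).map (fun t => [i + 1 + t, j])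
          else []) ++
          (if 2 ≤ al + ar then
            (PySem.List.pyRange 0 al 1).map (fun t => [i, j - 1 - t]) ++
            (PySem.List.pyRange 0 ar 1).map (fun t => [i, j + 1 + t])
          else [])
        let coords := if coords ≠ [] then coords ++ [[i, j]] else coords
        coords.foldl (fun (st : List (List Int) × PySem.Set (Int × Int)) cd =>
          let key := (PySem.List.pyGetD cd 0 0, PySem.List.pyGetD cd 1 0)
          if key ∈ st.2 then st else (st.1 ++ [cd], PySem.Set.add st.2 key)) st) st)
    ([], PySem.Set.empty)
  res.1

-- ===== PRECONDITION & SPEC =====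

-- Pre_ excludes non-square grids: on those A either raises IndexError (a row shorter than the
-- number of rows) or reads its own zero padding as if it were grid cells (a row longer than the
-- number of rows), an artefact of A's fixed len(grille)-based padding.
def Pre_recherche_combinaison_grille (grille : List (List Int)) : Prop :=
  ∀ row ∈ grille, row.length = grille.length
instance (grille : List (List Int)) : Decidable (Pre_recherche_combinaison_grille grille) := by
  unfold Pre_recherche_combinaison_grille; infer_instance

def pvWitness_recherche_combinaison_grille : List (List Int) :=
  [[1, 2, 3], [1, 5, 6], [1, 8, 9]]

def Spec_recherche_combinaison_grille (grille : List (List Int)) (out : List (List Int)) : Prop :=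
  out = recherche_combinaison_grille_alt grille
instance (grille : List (List Int)) (out : List (List Int)) :
    Decidable (Spec_recherche_combinaison_grille grille out) := by
  unfold Spec_recherche_combinaison_grille; infer_instance

-- ===== CLAIM (what is proved, stated in full; the proofs are below) =====
def Claim_equal_recherche_combinaison_grille : Prop :=
  ∀ (grille : List (List Int)), Dom_recherche_combinaison_grille grille →
    Pre_recherche_combinaison_grille grille →
    Spec_recherche_combinaison_grille grille (recherche_combinaison_grille grille)

-- ===== LEMMAS AND PROOFS =====

-- the padded grid both programs work on, in closed form
def pvPad (g : List (List Int)) : List (List Int) :=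
  [List.replicate (g.length + 2) 0] ++
    g.map (fun row => [(0 : Int)] ++ row ++ [0]) ++ [List.replicate (g.length + 2) 0]

def pvCol (P : List (List Int)) (c : Int) : List Int :=
  P.map (fun row => PySem.List.pyGetD row c 0)

-- run count at index c given a running count k and the element before the list
def pvRunQ (k : Nat) (prev : Option Int) (ys : List Int) : Nat → Nat
  | 0 => if prev = some (ys.getD 0 0) then k + 1 else 0
  | c + 1 => if ys.getD c 0 = ys.getD (c + 1) 0 then pvRunQ k prev ys c + 1 else 0

def pvRunL (ys : List Int) (c : Nat) : Nat := pvRunQ 0 none ys c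

def pvRunR (ys : List Int) (c : Nat) : Nat :=
  if h : c + 1 < ys.length ∧ ys.getD (c + 1) 0 = ys.getD c 0 then pvRunR ys (c + 1) + 1 else 0
termination_by ys.length - c
decreasing_by have := h.1; omega

def pvChain (k : Int) (prev : Option Int) : List Int → List Int
  | [] => []
  | y :: ys =>
    let k' := if prev = some y then k + 1 else 0
    k' :: pvChain k' (some y) ys

lemma pvRunsFwd_aux (ys : List Int) : ∀ (res : List Int) (k : Int) (prev : Option Int),
    (ys.foldl (fun (st : List Int × Int × Option Int) x =>
      let k := if st.2.2 = some x then st.2.1 + 1 else 0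
      (st.1 ++ [k], k, some x)) (res, k, prev)).1 = res ++ pvChain k prev ys := by
  induction ys with
  | nil => intro res k prev; simp [pvChain]
  | cons y ys ih =>
    intro res k prev
    simp only [List.foldl_cons, pvChain, ih]
    by_cases h : prev = some y <;> simp [h]

lemma pvRunsFwd_eq_chain (xs : List Int) : pvRunsFwd xs = pvChain 0 none xs := by
  simpa using pvRunsFwd_aux xs [] 0 none

lemma pvChain_length (ys : List Int) : ∀ k prev, (pvChain k prev ys).length = ys.length := by
  induction ys with
  | nil => intro k prev; rfl
  | cons y ys ih => intro k prev; simp [pvChain, ih]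

lemma pvRunQ_shift (y : Int) (ys : List Int) :
    ∀ (c : Nat) (k : Nat) (prev : Option Int),
    pvRunQ k prev (y :: ys) (c + 1) =
      pvRunQ (if prev = some y then k + 1 else 0) (some y) ys c := by
  intro c
  induction c with
  | zero =>
    intro k prev
    simp only [pvRunQ, List.getD_cons_zero, List.getD_cons_succ]
    by_cases h : y = ys.getD 0 0 <;> by_cases h2 : prev = some y <;> simp [h, h2]
  | succ c ih =>
    intro k prev
    conv_lhs => rw [pvRunQ]
    conv_rhs => rw [pvRunQ]
    rw [List.getD_cons_succ, List.getD_cons_succ, ih]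

lemma pvChain_getD (ys : List Int) : ∀ (k : Nat) (prev : Option Int) (c : Nat),
    c < ys.length → (pvChain (k : Int) prev ys).getD c 0 = ((pvRunQ k prev ys c : Nat) : Int) := by
  induction ys with
  | nil => intro k prev c h; simp at h
  | cons y ys ih =>
    intro k prev c hc
    cases c with
    | zero =>
      simp only [pvChain, List.getD_cons_zero, pvRunQ, List.getD_cons_zero]
      by_cases h : prev = some y <;> simp [h]
    | succ c =>
      simp only [pvChain, List.getD_cons_succ, pvRunQ_shift]
      by_cases h : prev = some y
      · simp only [h, if_pos rfl]
        have := ih (k + 1) (some y) c (by simpa using hc)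
        simpa using this
      · simp only [if_neg h]
        have := ih 0 (some y) c (by simpa using hc)
        simpa using this

lemma pvRunsFwd_length (xs : List Int) : (pvRunsFwd xs).length = xs.length := by
  rw [pvRunsFwd_eq_chain]; exact pvChain_length xs 0 none

lemma pvRunsFwd_getD (xs : List Int) (c : Nat) (hc : c < xs.length) :
    (pvRunsFwd xs).getD c 0 = ((pvRunL xs c : Nat) : Int) := by
  rw [pvRunsFwd_eq_chain]
  exact_mod_cast pvChain_getD xs 0 none c hc

lemma pv_getD_reverse (xs : List Int) (i : Nat) (hi : i < xs.length) :
    xs.reverse.getD i 0 = xs.getD (xs.length - 1 - i) 0 := by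
  rw [List.getD_eq_getElem _ _ (by simpa using hi), List.getD_eq_getElem _ _ (by omega)]
  simp [List.getElem_reverse]

lemma pvRunL_reverse (xs : List Int) : ∀ (c : Nat), c < xs.length →
    pvRunL xs.reverse (xs.length - 1 - c) = pvRunR xs c := by
  intro c hc
  induction hn : xs.length - c using Nat.strong_induction_on generalizing c with
  | _ m ih =>
  rw [pvRunR]
  rcases Nat.eq_or_lt_of_le (Nat.succ_le_of_lt hc) with heq | hlt
  · -- c = xs.length - 1 : last index
    have hc1 : xs.length - 1 - c = 0 := by omega
    rw [hc1]
    have : ¬ (c + 1 < xs.length ∧ xs.getD (c + 1) 0 = xs.getD c 0) := by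
      rintro ⟨h1, -⟩; omega
    rw [dif_neg this]
    simp [pvRunL, pvRunQ]
  · -- c + 1 < xs.length
    have hm : xs.length - 1 - c = (xs.length - 1 - (c + 1)) + 1 := by omega
    rw [hm]
    simp only [pvRunL, pvRunQ]
    have e1 : xs.reverse.getD (xs.length - 1 - (c + 1)) 0 = xs.getD (c + 1) 0 := by
      rw [pv_getD_reverse _ _ (by omega)]; congr 1; omega
    have e2 : xs.reverse.getD (xs.length - 1 - (c + 1) + 1) 0 = xs.getD c 0 := by
      rw [pv_getD_reverse _ _ (by omega)]; congr 1; omega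
    rw [e1, e2]
    by_cases hv : xs.getD (c + 1) 0 = xs.getD c 0
    · rw [if_pos hv, dif_pos ⟨hlt, hv⟩]
      have := ih (xs.length - (c + 1)) (by omega) (c + 1) hlt rfl
      simp only [pvRunL] at this
      rw [this]
    · rw [if_neg hv, dif_neg (by rintro ⟨-, h⟩; exact hv h)]

lemma pvRunsBwd_getD (xs : List Int) (c : Nat) (hc : c < xs.length) :
    (pvRunsBwd xs).getD c 0 = ((pvRunR xs c : Nat) : Int) := by
  unfold pvRunsBwd
  have h1 : (pvRunsFwd xs.reverse).reverse.getD c 0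
      = (pvRunsFwd xs.reverse).getD (xs.length - 1 - c) 0 := by
    have := pv_getD_reverse (pvRunsFwd xs.reverse) c
      (by rw [pvRunsFwd_length, List.length_reverse]; exact hc)
    rw [this]; congr 1; rw [pvRunsFwd_length, List.length_reverse]
  rw [h1, pvRunsFwd_getD _ _ (by rw [List.length_reverse]; omega)]
  rw [pvRunL_reverse xs c hc]


lemma pvGetD_nil {α : Type} (c : Int) (d : α) : PySem.List.pyGetD ([] : List α) c d = d := by
  rw [PySem.List.pyGetD, (PySem.List.pyGet?_eq_none_iff [] c).2 (by simp [PySem.Raise.InRange])]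
  rfl

lemma pvCol_getD (P : List (List Int)) (c : Int) (r : Nat) :
    (pvCol P c).getD r 0 = PySem.List.pyGetD (PySem.List.pyGetD P (r : Int) []) c 0 := by
  rw [PySem.List.pyGetD_natCast]
  calc (pvCol P c).getD r 0
      = (P.map (fun row => PySem.List.pyGetD row c 0)).getD r
          (PySem.List.pyGetD ([] : List Int) c 0) := by rw [pvGetD_nil]; rfl
    _ = PySem.List.pyGetD (P.getD r []) c 0 := List.getD_map P [] _

lemma pvCol_length (P : List (List Int)) (c : Int) : (pvCol P c).length = P.length := by
  simp [pvCol]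

lemma pvRunR_unfold (ys : List Int) (c : Nat) :
    pvRunR ys c = if c + 1 < ys.length ∧ ys.getD (c + 1) 0 = ys.getD c 0
      then pvRunR ys (c + 1) + 1 else 0 := by
  rw [pvRunR]
  split_ifs with h <;> rfl

lemma pvMonte_spec (P : List (List Int)) (c : Int) :
    ∀ (r : Nat) (v : Int) (acc : List (List Int)), v = (pvCol P c).getD r 0 →
    pvMonte P c v (r : Int) acc
      = ((r : Int) - ((pvRunL (pvCol P c) r : Nat) : Int),
         acc ++ (List.range (pvRunL (pvCol P c) r)).map
           (fun (t : Nat) => [(r : Int) - (t : Int) - 2, c - 1])) := by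
  intro r
  induction r with
  | zero =>
    intro v acc hv
    rw [pvMonte]
    rw [dif_neg (by rintro ⟨h, -⟩; omega)]
    simp [pvRunL, pvRunQ]
  | succ r ih =>
    intro v acc hv
    rw [pvMonte]
    have hidx : ((r + 1 : Nat) : Int) - 1 = (r : Int) := by push_cast; ring
    have hget : PySem.List.pyGetD (PySem.List.pyGetD P (((r + 1 : Nat) : Int) - 1) []) c 0
        = (pvCol P c).getD r 0 := by rw [hidx, ← pvCol_getD]
    have hrun : pvRunL (pvCol P c) (r + 1)
        = if (pvCol P c).getD r 0 = (pvCol P c).getD (r + 1) 0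
          then pvRunL (pvCol P c) r + 1 else 0 := rfl
    by_cases h : (pvCol P c).getD r 0 = v
    · rw [dif_pos ⟨by exact_mod_cast Nat.succ_pos r, by rw [hget]; exact h⟩]
      rw [hidx]
      rw [ih v (acc ++ [[(r : Int) - 1, c - 1]]) h.symm]
      have hr1 : pvRunL (pvCol P c) (r + 1) = pvRunL (pvCol P c) r + 1 := by
        rw [hrun, if_pos (by rw [h, hv])]
      rw [hr1]
      refine Prod.ext ?_ ?_
      · push_cast; ring
      · rw [List.range_succ_eq_map, List.map_cons, List.map_map, List.append_assoc,
          List.singleton_append]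
        refine congrArg (acc ++ ·) ?_
        refine congrArg₂ List.cons ?_ ?_
        · simp only [List.cons.injEq, and_true, true_and] <;> (push_cast; omega)
        · refine List.map_congr_left ?_
          intro t _
          simp only [Function.comp_apply, List.cons.injEq, and_true, true_and] <;> (push_cast; omega)
    · rw [dif_neg (by rintro ⟨-, hh⟩; rw [hget] at hh; exact h hh)]
      have hr0 : pvRunL (pvCol P c) (r + 1) = 0 := by
        rw [hrun, if_neg (by rw [← hv]; exact h)]
      rw [hr0]
      simp

lemma pvDescend_spec (P : List (List Int)) (c : Int) :
    ∀ (r : Nat) (v : Int) (acc : List (List Int)), v = (pvCol P c).getD r 0 →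
    pvDescend P c v (r : Int) acc
      = ((r : Int) + ((pvRunR (pvCol P c) r : Nat) : Int),
         acc ++ (List.range (pvRunR (pvCol P c) r)).map
           (fun (t : Nat) => [(r : Int) + (t : Int), c - 1])) := by
  intro r
  induction hm : P.length - r using Nat.strong_induction_on generalizing r with
  | _ m ih =>
  intro v acc hv
  rw [pvDescend]
  have hidx : ((r : Int)) + 1 = ((r + 1 : Nat) : Int) := by push_cast; ring
  have hget : PySem.List.pyGetD (PySem.List.pyGetD P (((r + 1 : Nat) : Int)) []) c 0
      = (pvCol P c).getD (r + 1) 0 := by rw [← pvCol_getD]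
  rw [pvRunR_unfold, pvCol_length]
  by_cases h : r + 1 < P.length ∧ (pvCol P c).getD (r + 1) 0 = v
  · have hcond : (r : Int) < (P.length : Int) - 1 := by
      have := h.1; omega
    rw [dif_pos ⟨hcond, by rw [hidx, hget]; exact h.2⟩]
    rw [hidx]
    rw [ih (P.length - (r + 1)) (by omega) (r + 1) (by omega) v
      (acc ++ [[((r + 1 : Nat) : Int) - 1, c - 1]]) h.2.symm]
    rw [if_pos ⟨h.1, by rw [h.2, hv]⟩]
    refine Prod.ext ?_ ?_
    · push_cast; ring
    · rw [List.range_succ_eq_map, List.map_cons, List.map_map, List.append_assoc,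
        List.singleton_append]
      refine congrArg (acc ++ ·) ?_
      refine congrArg₂ List.cons ?_ ?_
      · simp only [List.cons.injEq, and_true, true_and] <;> (push_cast; omega)
      · refine List.map_congr_left ?_
        intro t _
        simp only [Function.comp_apply, List.cons.injEq, and_true, true_and] <;> (push_cast; omega)
  · have hcond : ¬ ((r : Int) < (P.length : Int) - 1 ∧
        PySem.List.pyGetD (PySem.List.pyGetD P ((r : Int) + 1) []) c 0 = v) := by
      rintro ⟨h1, h2⟩
      rw [hidx, hget] at h2
      exact h ⟨by omega, h2⟩
    rw [dif_neg hcond]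
    rw [if_neg (by rintro ⟨h1, h2⟩; exact h ⟨h1, by rw [h2, hv]⟩)]
    simp

lemma pvGauche_spec (gc : List (List Int)) (ri : Int) :
    ∀ (cj : Nat) (v : Int) (acc : List (List Int)),
      v = (PySem.List.pyGetD gc ri []).getD cj 0 →
    pvGauche gc ri v (cj : Int) acc
      = ((cj : Int) - ((pvRunL (PySem.List.pyGetD gc ri []) cj : Nat) : Int),
         acc ++ (List.range (pvRunL (PySem.List.pyGetD gc ri []) cj)).map
           (fun (t : Nat) => [ri - 1, (cj : Int) - (t : Int) - 2])) := by
  set xs := PySem.List.pyGetD gc ri [] with hxs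
  intro cj
  induction cj with
  | zero =>
    intro v acc hv
    rw [pvGauche]
    rw [dif_neg (by rintro ⟨h, -⟩; omega)]
    simp [pvRunL, pvRunQ]
  | succ cj ih =>
    intro v acc hv
    rw [pvGauche]
    have hidx : ((cj + 1 : Nat) : Int) - 1 = (cj : Int) := by push_cast; ring
    have hget : PySem.List.pyGetD xs (((cj + 1 : Nat) : Int) - 1) 0 = xs.getD cj 0 := by
      rw [hidx, hxs, PySem.List.pyGetD_natCast]
    have hrun : pvRunL xs (cj + 1)
        = if xs.getD cj 0 = xs.getD (cj + 1) 0 then pvRunL xs cj + 1 else 0 := rfl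
    by_cases h : xs.getD cj 0 = v
    · rw [dif_pos ⟨by exact_mod_cast Nat.succ_pos cj, by rw [hget]; exact h⟩]
      rw [hidx]
      rw [ih v (acc ++ [[ri - 1, (cj : Int) - 1]]) h.symm]
      have hr1 : pvRunL xs (cj + 1) = pvRunL xs cj + 1 := by
        rw [hrun, if_pos (by rw [h, hv])]
      rw [hr1]
      refine Prod.ext ?_ ?_
      · push_cast; ring
      · rw [List.range_succ_eq_map, List.map_cons, List.map_map, List.append_assoc,
          List.singleton_append]
        refine congrArg (acc ++ ·) ?_
        refine congrArg₂ List.cons ?_ ?_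
        · simp only [List.cons.injEq, and_true, true_and] <;> (push_cast; omega)
        · refine List.map_congr_left ?_
          intro t _
          simp only [Function.comp_apply, List.cons.injEq, and_true, true_and] <;> (push_cast; omega)
    · rw [dif_neg (by rintro ⟨-, hh⟩; rw [hget] at hh; exact h hh)]
      have hr0 : pvRunL xs (cj + 1) = 0 := by
        rw [hrun, if_neg (by rw [← hv]; exact h)]
      rw [hr0]
      simp

lemma pvDroite_spec (gc : List (List Int)) (ri : Int)
    (hxl : (PySem.List.pyGetD gc ri []).length = gc.length) :
    ∀ (cj : Nat) (v : Int) (acc : List (List Int)),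
      v = (PySem.List.pyGetD gc ri []).getD cj 0 →
    pvDroite gc ri v (cj : Int) acc
      = ((cj : Int) + ((pvRunR (PySem.List.pyGetD gc ri []) cj : Nat) : Int),
         acc ++ (List.range (pvRunR (PySem.List.pyGetD gc ri []) cj)).map
           (fun (t : Nat) => [ri - 1, (cj : Int) + (t : Int)])) := by
  set xs := PySem.List.pyGetD gc ri [] with hxs
  intro cj
  induction hm : gc.length - cj using Nat.strong_induction_on generalizing cj with
  | _ m ih =>
  intro v acc hv
  rw [pvDroite]
  have hidx : ((cj : Int)) + 1 = ((cj + 1 : Nat) : Int) := by push_cast; ring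
  have hget : PySem.List.pyGetD xs (((cj + 1 : Nat) : Int)) 0 = xs.getD (cj + 1) 0 := by
    rw [hxs, PySem.List.pyGetD_natCast]
  rw [pvRunR_unfold, hxl]
  by_cases h : cj + 1 < gc.length ∧ xs.getD (cj + 1) 0 = v
  · have hcond : (cj : Int) < (gc.length : Int) - 1 := by have := h.1; omega
    rw [dif_pos ⟨hcond, by rw [hidx, hget]; exact h.2⟩]
    rw [hidx]
    rw [ih (gc.length - (cj + 1)) (by omega) (cj + 1) (by omega) v
      (acc ++ [[ri - 1, ((cj + 1 : Nat) : Int) - 1]]) h.2.symm]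
    rw [if_pos ⟨h.1, by rw [h.2, hv]⟩]
    refine Prod.ext ?_ ?_
    · push_cast; ring
    · rw [List.range_succ_eq_map, List.map_cons, List.map_map, List.append_assoc,
        List.singleton_append]
      refine congrArg (acc ++ ·) ?_
      refine congrArg₂ List.cons ?_ ?_
      · simp only [List.cons.injEq, and_true, true_and] <;> (push_cast; omega)
      · refine List.map_congr_left ?_
        intro t _
        simp only [Function.comp_apply, List.cons.injEq, and_true, true_and] <;> (push_cast; omega)
  · have hcond : ¬ ((cj : Int) < (gc.length : Int) - 1 ∧
        PySem.List.pyGetD xs ((cj : Int) + 1) 0 = v) := by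
      rintro ⟨h1, h2⟩
      rw [hidx, hget] at h2
      exact h ⟨by omega, h2⟩
    rw [dif_neg hcond]
    rw [if_neg (by rintro ⟨h1, h2⟩; exact h ⟨h1, by rw [h2, hv]⟩)]
    simp

lemma pvPad_length (g : List (List Int)) : (pvPad g).length = g.length + 2 := by
  simp [pvPad]

lemma pvPad_row (g : List (List Int)) (hsq : ∀ row ∈ g, row.length = g.length) :
    ∀ row ∈ pvPad g, row.length = g.length + 2 := by
  intro row hrow
  simp only [pvPad, List.mem_append, List.mem_map, List.mem_singleton] at hrow
  rcases hrow with (rfl | ⟨r, hr, rfl⟩) | rfl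
  · simp
  · simp [hsq r hr]
  · simp

lemma pvScotch_eq_pad (g : List (List Int)) (hsq : ∀ row ∈ g, row.length = g.length) :
    pvScotch g = pvPad g := by
  simp only [pvScotch, pvPad]
  have hligne : (PySem.List.pyRange 0 ((g.length : Int) + 2) 1).foldl
      (fun acc _ => acc ++ [(0 : Int)]) [] = List.replicate (g.length + 2) (0 : Int) := by
    rw [PySem.List.foldl_append_singleton_eq_map, List.map_const',
      PySem.List.length_pyRange_one, List.nil_append]
    have h2 : ((g.length : Int) + 2 - 0).toNat = g.length + 2 := by omega
    rw [h2]
  rw [hligne, PySem.List.foldl_append_singleton_eq_map]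
  congr 1
  congr 1
  have hstep : ∀ i ∈ PySem.List.pyRange 0 (g.length : Int) 1,
      (List.foldl (fun l j => l ++ [PySem.List.pyGetD (PySem.List.pyGetD g i []) j 0])
        [(0 : Int)] (PySem.List.pyRange 0 (g.length : Int) 1)) ++ [(0 : Int)]
      = [(0 : Int)] ++ PySem.List.pyGetD g i [] ++ [(0 : Int)] := by
    intro i hi
    rw [PySem.List.foldl_append_singleton_eq_map]
    have hmem : 0 ≤ i ∧ i < (g.length : Int) := PySem.List.mem_pyRange_one.1 hi
    have hrowmem : PySem.List.pyGetD g i [] ∈ g := by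
      rw [PySem.List.pyGetD_of_nonneg g [] hmem.1,
        List.getD_eq_getElem g [] (n := i.toNat) (by omega)]
      exact List.getElem_mem _
    have hlen : (PySem.List.pyGetD g i []).length = g.length := hsq _ hrowmem
    have hrng : PySem.List.pyRange 0 (g.length : Int) 1
        = PySem.List.pyRange 0 (PySem.List.len (PySem.List.pyGetD g i [])) 1 := by
      rw [PySem.List.len_eq, hlen]
    rw [hrng, PySem.List.map_pyGetD_pyRange_zero]
  rw [List.map_congr_left hstep]
  have hcomp : (fun i => [(0 : Int)] ++ PySem.List.pyGetD g i [] ++ [(0 : Int)])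
      = (fun row => [(0 : Int)] ++ row ++ [(0 : Int)]) ∘ (fun i => PySem.List.pyGetD g i []) := rfl
  have hg : List.map (fun i => PySem.List.pyGetD g i []) (PySem.List.pyRange 0 (g.length : Int) 1)
      = g := by
    have := PySem.List.map_pyGetD_pyRange_zero g ([] : List Int)
    rwa [PySem.List.len_eq] at this
  rw [hcomp, ← List.map_map, hg]

-- the per-cell coordinate block both programs generate, in closed form
def pvBlock (g : List (List Int)) (i j : Nat) : List (List Int) :=
  let P := pvPad g
  let cc := pvCol P ((j : Int) + 1)
  let rr := PySem.List.pyGetD P ((i : Int) + 1) []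
  let au := pvRunL cc (i + 1)
  let ad := pvRunR cc (i + 1)
  let al := pvRunL rr (j + 1)
  let ar := pvRunR rr (j + 1)
  let lcf :=
    (if 2 ≤ au + ad then
      (List.range au).map (fun (t : Nat) => [(i : Int) - 1 - (t : Int), (j : Int)]) ++
      (List.range ad).map (fun (t : Nat) => [(i : Int) + 1 + (t : Int), (j : Int)])
     else []) ++
    (if 2 ≤ al + ar then
      (List.range al).map (fun (t : Nat) => [(i : Int), (j : Int) - 1 - (t : Int)]) ++
      (List.range ar).map (fun (t : Nat) => [(i : Int), (j : Int) + 1 + (t : Int)])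
     else [])
  if lcf ≠ [] then lcf ++ [[(i : Int), (j : Int)]] else lcf

lemma pvMonte_snd (P : List (List Int)) (c : Int) (r : Nat) (v : Int)
    (acc : List (List Int)) (hv : v = (pvCol P c).getD r 0) :
    (pvMonte P c v (r : Int) acc).2
      = acc ++ (List.range (pvRunL (pvCol P c) r)).map
          (fun (t : Nat) => [(r : Int) - (t : Int) - 2, c - 1]) := by
  rw [pvMonte_spec P c r v acc hv]

lemma pvDescend_snd (P : List (List Int)) (c : Int) (r : Nat) (v : Int)
    (acc : List (List Int)) (hv : v = (pvCol P c).getD r 0) :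
    (pvDescend P c v (r : Int) acc).2
      = acc ++ (List.range (pvRunR (pvCol P c) r)).map
          (fun (t : Nat) => [(r : Int) + (t : Int), c - 1]) := by
  rw [pvDescend_spec P c r v acc hv]

lemma pvGauche_snd (gc : List (List Int)) (ri : Int) (cj : Nat) (v : Int)
    (acc : List (List Int)) (hv : v = (PySem.List.pyGetD gc ri []).getD cj 0) :
    (pvGauche gc ri v (cj : Int) acc).2
      = acc ++ (List.range (pvRunL (PySem.List.pyGetD gc ri []) cj)).map
          (fun (t : Nat) => [ri - 1, (cj : Int) - (t : Int) - 2]) := by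
  rw [pvGauche_spec gc ri cj v acc hv]

lemma pvDroite_snd (gc : List (List Int)) (ri : Int)
    (hxl : (PySem.List.pyGetD gc ri []).length = gc.length) (cj : Nat) (v : Int)
    (acc : List (List Int)) (hv : v = (PySem.List.pyGetD gc ri []).getD cj 0) :
    (pvDroite gc ri v (cj : Int) acc).2
      = acc ++ (List.range (pvRunR (PySem.List.pyGetD gc ri []) cj)).map
          (fun (t : Nat) => [ri - 1, (cj : Int) + (t : Int)]) := by
  rw [pvDroite_spec gc ri hxl cj v acc hv]

lemma pvDetecte_eq_block (g : List (List Int)) (hsq : ∀ row ∈ g, row.length = g.length)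
    (i j : Nat) (hi : i < g.length) (hj : j < g.length) :
    pvDetecte g (i : Int) (j : Int) = pvBlock g i j := by
  have hcast1 : (i : Int) + 1 = ((i + 1 : Nat) : Int) := by push_cast; ring
  have hcast2 : (j : Int) + 1 = ((j + 1 : Nat) : Int) := by push_cast; ring
  simp only [pvDetecte]
  rw [pvScotch_eq_pad g hsq, hcast1, hcast2]
  set P := pvPad g with hP
  have hPlen : P.length = g.length + 2 := pvPad_length g
  set etat := PySem.List.pyGetD (PySem.List.pyGetD P ((i + 1 : Nat) : Int) [])
    ((j + 1 : Nat) : Int) 0 with hetat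
  have h1 : etat = (pvCol P ((j + 1 : Nat) : Int)).getD (i + 1) 0 := by
    rw [hetat, pvCol_getD]
  have h2 : etat = (PySem.List.pyGetD P ((i + 1 : Nat) : Int) []).getD (j + 1) 0 := by
    rw [hetat, PySem.List.pyGetD_natCast]
  have hxl : (PySem.List.pyGetD P ((i + 1 : Nat) : Int) []).length = P.length := by
    have hrowmem : PySem.List.pyGetD P ((i + 1 : Nat) : Int) [] ∈ P := by
      rw [PySem.List.pyGetD_natCast,
        List.getD_eq_getElem P [] (n := i + 1) (by omega)]
      exact List.getElem_mem _
    rw [pvPad_row g hsq _ hrowmem, hPlen]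
  rw [pvMonte_snd P ((j + 1 : Nat) : Int) (i + 1) etat [] h1, List.nil_append]
  rw [pvDescend_snd P ((j + 1 : Nat) : Int) (i + 1) etat _ h1]
  rw [pvGauche_snd P ((i + 1 : Nat) : Int) (j + 1) etat [] h2, List.nil_append]
  rw [pvDroite_snd P ((i + 1 : Nat) : Int) hxl (j + 1) etat _ h2]
  -- abbreviate the four run counts
  set au := pvRunL (pvCol P ((j + 1 : Nat) : Int)) (i + 1) with hau
  set ad := pvRunR (pvCol P ((j + 1 : Nat) : Int)) (i + 1) with had
  set al := pvRunL (PySem.List.pyGetD P ((i + 1 : Nat) : Int) []) (j + 1) with hal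
  set ar := pvRunR (PySem.List.pyGetD P ((i + 1 : Nat) : Int) []) (j + 1) with har
  -- rewrite the coordinate formulas to the unpadded ones
  have cUp : (fun (t : Nat) => ([((i + 1 : Nat) : Int) - (t : Int) - 2,
      ((j + 1 : Nat) : Int) - 1] : List Int))
      = (fun (t : Nat) => [(i : Int) - 1 - (t : Int), (j : Int)]) := by
    funext t
    simp only [List.cons.injEq, and_true]
    push_cast
    omega
  have cDown : (fun (t : Nat) => ([((i + 1 : Nat) : Int) + (t : Int),
      ((j + 1 : Nat) : Int) - 1] : List Int))
      = (fun (t : Nat) => [(i : Int) + 1 + (t : Int), (j : Int)]) := by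
    funext t
    simp only [List.cons.injEq, and_true]
    push_cast
    omega
  have cLeft : (fun (t : Nat) => ([((i + 1 : Nat) : Int) - 1,
      ((j + 1 : Nat) : Int) - (t : Int) - 2] : List Int))
      = (fun (t : Nat) => [(i : Int), (j : Int) - 1 - (t : Int)]) := by
    funext t
    simp only [List.cons.injEq, and_true]
    push_cast
    omega
  have cRight : (fun (t : Nat) => ([((i + 1 : Nat) : Int) - 1,
      ((j + 1 : Nat) : Int) + (t : Int)] : List Int))
      = (fun (t : Nat) => [(i : Int), (j : Int) + 1 + (t : Int)]) := by
    funext t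
    simp only [List.cons.injEq, and_true]
    push_cast
    omega
  rw [cUp, cDown, cLeft, cRight]
  -- now both sides are the same shape up to the if-conditions
  simp only [pvBlock]
  rw [hcast1, hcast2, ← hP]
  rw [← hau, ← had, ← hal, ← har]
  set mUp := (List.range au).map (fun (t : Nat) => ([(i : Int) - 1 - (t : Int), (j : Int)] : List Int))
  set mDown := (List.range ad).map (fun (t : Nat) => ([((i + 1 : Nat) : Int) + (t : Int), (j : Int)] : List Int))
  set mLeft := (List.range al).map (fun (t : Nat) => ([(i : Int), (j : Int) - 1 - (t : Int)] : List Int))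
  set mRight := (List.range ar).map (fun (t : Nat) => ([(i : Int), ((j + 1 : Nat) : Int) + (t : Int)] : List Int))
  have lUp : mUp.length = au := by simp [mUp]
  have lDown : mDown.length = ad := by simp [mDown]
  have lLeft : mLeft.length = al := by simp [mLeft]
  have lRight : mRight.length = ar := by simp [mRight]
  have e1 : (if (mUp ++ mDown).length < 2 then ([] : List (List Int)) else [] ++ (mUp ++ mDown))
      = (if 2 ≤ au + ad then mUp ++ mDown else []) := by
    rw [List.nil_append]
    rcases Nat.lt_or_ge (mUp ++ mDown).length 2 with h | h
    · rw [if_pos h, if_neg (by rw [List.length_append, lUp, lDown] at h; omega)]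
    · rw [if_neg (by omega), if_pos (by rw [List.length_append, lUp, lDown] at h; omega)]
  rw [e1]
  set X := (if 2 ≤ au + ad then mUp ++ mDown else ([] : List (List Int))) with hX
  have e2 : (if (mLeft ++ mRight).length < 2 then X else X ++ (mLeft ++ mRight))
      = X ++ (if 2 ≤ al + ar then mLeft ++ mRight else []) := by
    rcases Nat.lt_or_ge (mLeft ++ mRight).length 2 with h | h
    · rw [if_pos h, if_neg (by rw [List.length_append, lLeft, lRight] at h; omega),
        List.append_nil]
    · rw [if_neg (by omega), if_pos (by rw [List.length_append, lLeft, lRight] at h; omega)]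
  rw [e2]
  set Y := (if 2 ≤ al + ar then mLeft ++ mRight else ([] : List (List Int))) with hY
  have hXlen : X.length = if 2 ≤ au + ad then au + ad else 0 := by
    rw [hX]; split_ifs <;> simp [lUp, lDown]
  have hYlen : Y.length = if 2 ≤ al + ar then al + ar else 0 := by
    rw [hY]; split_ifs <;> simp [lLeft, lRight]
  have e3 : (2 ≤ (X ++ Y).length) ↔ (X ++ Y ≠ []) := by
    rw [← List.length_pos_iff_ne_nil, List.length_append, hXlen, hYlen]
    split_ifs <;> omega
  simp only [e3]

-- the common stream of per-cell coordinate blocks, row-major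
def pvStream (g : List (List Int)) : List (List Int) :=
  (List.range g.length).flatMap (fun i => (List.range g.length).flatMap (fun j => pvBlock g i j))

lemma pvA_stream (g : List (List Int)) (hsq : ∀ row ∈ g, row.length = g.length) :
    recherche_combinaison_grille g
      = (pvStream g).foldl (fun sd coord => if coord ∈ sd then sd else sd ++ [coord]) [] := by
  simp only [recherche_combinaison_grille]
  refine congrArg (List.foldl _ []) ?_
  rw [PySem.List.pyRange_zero_natCast, List.foldl_map]
  have hbody : ∀ (acc : List (List Int)), ∀ i ∈ List.range g.length,
      List.foldl (fun acc2 j => acc2 ++ pvDetecte g (i : Int) j) acc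
        (PySem.List.pyRange 0 (((PySem.List.pyGetD g (i : Int) []).length : Int)) 1)
      = acc ++ (List.range g.length).flatMap (fun j => pvBlock g i j) := by
    intro acc i hi
    have hi' : i < g.length := List.mem_range.1 hi
    have hrowmem : PySem.List.pyGetD g (i : Int) [] ∈ g := by
      rw [PySem.List.pyGetD_natCast, List.getD_eq_getElem g [] (n := i) hi']
      exact List.getElem_mem _
    have hlen : ((PySem.List.pyGetD g (i : Int) []).length : Int) = (g.length : Int) := by
      exact_mod_cast congrArg Nat.cast (hsq _ hrowmem)
    rw [hlen, PySem.List.pyRange_zero_natCast, List.foldl_map]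
    rw [PySem.List.foldl_congr_mem (List.range g.length)
      (fun acc2 (j : Nat) => acc2 ++ pvDetecte g (i : Int) (j : Int))
      (fun acc2 (j : Nat) => acc2 ++ pvBlock g i j) acc
      (fun acc2 j hj => by
        show acc2 ++ pvDetecte g (i : Int) (j : Int) = acc2 ++ pvBlock g i j
        rw [pvDetecte_eq_block g hsq i j hi' (List.mem_range.1 hj)])]
    rw [PySem.List.foldl_append_eq_flatMap]
  rw [PySem.List.foldl_congr_mem (List.range g.length) _
    (fun acc (i : Nat) => acc ++ (List.range g.length).flatMap (fun j => pvBlock g i j)) []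
    (fun acc i hi => hbody acc i hi)]
  rw [PySem.List.foldl_append_eq_flatMap, List.nil_append]
  rfl

lemma pvDedup_eq (S : List (List Int)) :
    ∀ (out : List (List Int)) (seen : PySem.Set (Int × Int)),
    (∀ x ∈ S, ∃ a b : Int, x = [a, b]) →
    (∀ a b : Int, ((a, b) ∈ seen ↔ [a, b] ∈ out)) →
    (S.foldl (fun st cd =>
        if (PySem.List.pyGetD cd 0 0, PySem.List.pyGetD cd 1 0) ∈ st.2 then st
        else (st.1 ++ [cd], PySem.Set.add st.2
          (PySem.List.pyGetD cd 0 0, PySem.List.pyGetD cd 1 0)))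
      (out, seen)).1
    = S.foldl (fun sd coord => if coord ∈ sd then sd else sd ++ [coord]) out := by
  induction S with
  | nil => intro out seen _ _; rfl
  | cons x S ih =>
    intro out seen hS hinv
    obtain ⟨a, b, rfl⟩ := hS _ (List.mem_cons_self ..)
    have hkey0 : PySem.List.pyGetD ([a, b] : List Int) 0 0 = a := rfl
    have hkey1 : PySem.List.pyGetD ([a, b] : List Int) 1 0 = b := rfl
    simp only [List.foldl_cons, hkey0, hkey1]
    by_cases hmem : [a, b] ∈ out
    · rw [if_pos ((hinv a b).2 hmem), if_pos hmem]
      exact ih out seen (fun x hx => hS x (List.mem_cons_of_mem _ hx)) hinv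
    · rw [if_neg (fun hc => hmem ((hinv a b).1 hc)), if_neg hmem]
      refine ih _ _ (fun x hx => hS x (List.mem_cons_of_mem _ hx)) ?_
      intro a' b'
      rw [PySem.Set.mem_add]
      constructor
      · rintro (h | h)
        · exact List.mem_append_left _ ((hinv a' b').1 h)
        · rw [Prod.mk.injEq] at h
          refine List.mem_append_right _ ?_
          simp [h.1, h.2]
      · intro h
        rcases List.mem_append.1 h with h | h
        · exact Or.inl ((hinv a' b').2 h)
        · simp only [List.mem_singleton, List.cons.injEq, and_true] at h
          exact Or.inr (by rw [Prod.mk.injEq]; exact ⟨h.1, h.2⟩)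

lemma pvBlock_pairs (g : List (List Int)) (i j : Nat) :
    ∀ x ∈ pvBlock g i j, ∃ a b : Int, x = [a, b] := by
  intro x hx
  simp only [pvBlock] at hx
  split_ifs at hx <;>
    simp only [List.mem_append, List.mem_map, List.mem_range, List.mem_singleton,
      List.not_mem_nil, or_false, false_or] at hx <;>
    first
      | (rcases hx with ((⟨t, -, rfl⟩ | ⟨t, -, rfl⟩) | (⟨t, -, rfl⟩ | ⟨t, -, rfl⟩)) | rfl <;>
          exact ⟨_, _, rfl⟩)
      | (rcases hx with (⟨t, -, rfl⟩ | ⟨t, -, rfl⟩) | (⟨t, -, rfl⟩ | ⟨t, -, rfl⟩) <;>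
          exact ⟨_, _, rfl⟩)
      | (rcases hx with (⟨t, -, rfl⟩ | ⟨t, -, rfl⟩) | rfl <;> exact ⟨_, _, rfl⟩)
      | (rcases hx with ⟨t, -, rfl⟩ | ⟨t, -, rfl⟩ <;> exact ⟨_, _, rfl⟩)
      | exact ⟨_, _, rfl⟩
      | aesop

lemma pvStream_pairs (g : List (List Int)) :
    ∀ x ∈ pvStream g, ∃ a b : Int, x = [a, b] := by
  intro x hx
  simp only [pvStream, List.mem_flatMap, List.mem_range] at hx
  obtain ⟨i, -, k, -, hk⟩ := hx
  exact pvBlock_pairs g i _ x hk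

lemma pvCols_entry (P : List (List Int)) (c : Int) :
    (PySem.List.pyRange 0 ((P.length : Int)) 1).map
      (fun r => PySem.List.pyGetD (PySem.List.pyGetD P r []) c 0) = pvCol P c := by
  have h1 : ∀ r ∈ PySem.List.pyRange 0 ((P.length : Int)) 1,
      PySem.List.pyGetD (PySem.List.pyGetD P r []) c 0
        = PySem.List.pyGetD (pvCol P c) r 0 := by
    intro r hr
    have hm := PySem.List.mem_pyRange_one.1 hr
    conv_rhs => rw [PySem.List.pyGetD_of_nonneg _ _ hm.1]
    rw [pvCol_getD, Int.toNat_of_nonneg hm.1]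
  rw [List.map_congr_left h1]
  have h2 : ((P.length : Int)) = PySem.List.len (pvCol P c) := by
    rw [PySem.List.len_eq, pvCol_length]
  rw [h2, PySem.List.map_pyGetD_pyRange_zero]

set_option maxHeartbeats 2000000 in
lemma pvAlt_stream (g : List (List Int)) (hsq : ∀ row ∈ g, row.length = g.length) :
    recherche_combinaison_grille_alt g
      = ((pvStream g).foldl (fun st cd =>
            if (PySem.List.pyGetD cd 0 0, PySem.List.pyGetD cd 1 0) ∈ st.2 then st
            else (st.1 ++ [cd], PySem.Set.add st.2
              (PySem.List.pyGetD cd 0 0, PySem.List.pyGetD cd 1 0)))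
          ([], PySem.Set.empty)).1 := by
  simp only [recherche_combinaison_grille_alt]
  have hPdef : [List.replicate (g.length + 2) (0 : Int)]
      ++ g.map (fun row => [(0 : Int)] ++ row ++ [0])
      ++ [List.replicate (g.length + 2) (0 : Int)] = pvPad g := rfl
  rw [hPdef]
  set P := pvPad g with hP
  have hPlen : P.length = g.length + 2 := by rw [hP, pvPad_length]
  have hm : ((g.length : Int) + 2) = ((P.length : Int)) := by
    rw [hPlen]; push_cast; ring
  rw [hm]
  have hcols : (PySem.List.pyRange 0 ((P.length : Int)) 1).map
      (fun c => (PySem.List.pyRange 0 ((P.length : Int)) 1).map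
        (fun r => PySem.List.pyGetD (PySem.List.pyGetD P r []) c 0))
      = (PySem.List.pyRange 0 ((P.length : Int)) 1).map (fun c => pvCol P c) :=
    List.map_congr_left (fun c _ => pvCols_entry P c)
  rw [hcols]
  have hrng : PySem.List.pyRange 0 ((g.length : Int)) 1
      = (List.range g.length).map (fun (k : Nat) => (k : Int)) :=
    PySem.List.pyRange_zero_natCast g.length
  rw [hrng, List.foldl_map]
  refine congrArg Prod.fst ?_
  rw [PySem.List.foldl_congr_mem (List.range g.length) _
    (fun st (i : Nat) => List.foldl (fun st cd =>
        if (PySem.List.pyGetD cd 0 0, PySem.List.pyGetD cd 1 0) ∈ st.2 then st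
        else (st.1 ++ [cd], PySem.Set.add st.2
          (PySem.List.pyGetD cd 0 0, PySem.List.pyGetD cd 1 0))) st
      ((List.range g.length).flatMap (fun j => pvBlock g i j)))
    ([], PySem.Set.empty) ?_]
  · rw [← List.foldl_flatMap]
    rfl
  intro st0 i hi
  have hi' : i < g.length := List.mem_range.1 hi
  show List.foldl _ st0 ((List.range g.length).map (fun (k : Nat) => (k : Int))) = _
  rw [List.foldl_map]
  rw [PySem.List.foldl_congr_mem (List.range g.length) _
    (fun st (j : Nat) => List.foldl (fun st cd =>
        if (PySem.List.pyGetD cd 0 0, PySem.List.pyGetD cd 1 0) ∈ st.2 then st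
        else (st.1 ++ [cd], PySem.Set.add st.2
          (PySem.List.pyGetD cd 0 0, PySem.List.pyGetD cd 1 0))) st
      (pvBlock g i j)) st0 ?_]
  · rw [← List.foldl_flatMap]
  intro st j hj
  have hj' : j < g.length := List.mem_range.1 hj
  show List.foldl _ st _ = List.foldl _ st (pvBlock g i j)
  refine congrArg (List.foldl _ st) ?_
  -- the per-cell coordinate list equals pvBlock g i j
  have hcast1 : (i : Int) + 1 = ((i + 1 : Nat) : Int) := by push_cast; ring
  have hcast2 : (j : Int) + 1 = ((j + 1 : Nat) : Int) := by push_cast; ring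
  rw [hcast1, hcast2]
  -- entries of the four tables
  have hupE : PySem.List.pyGetD (PySem.List.pyGetD
      (((PySem.List.pyRange 0 ((P.length : Int)) 1).map (fun c => pvCol P c)).map pvRunsFwd)
      ((j + 1 : Nat) : Int) []) ((i + 1 : Nat) : Int) 0
      = ((pvRunL (pvCol P ((j + 1 : Nat) : Int)) (i + 1) : Nat) : Int) := by
    rw [List.map_map, PySem.List.pyGetD_map_pyRange _ P.length (j + 1) [] (by omega),
      Function.comp_apply, PySem.List.pyGetD_natCast,
      pvRunsFwd_getD _ (i + 1) (by rw [pvCol_length]; omega)]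
  have hdownE : PySem.List.pyGetD (PySem.List.pyGetD
      (((PySem.List.pyRange 0 ((P.length : Int)) 1).map (fun c => pvCol P c)).map pvRunsBwd)
      ((j + 1 : Nat) : Int) []) ((i + 1 : Nat) : Int) 0
      = ((pvRunR (pvCol P ((j + 1 : Nat) : Int)) (i + 1) : Nat) : Int) := by
    rw [List.map_map, PySem.List.pyGetD_map_pyRange _ P.length (j + 1) [] (by omega),
      Function.comp_apply, PySem.List.pyGetD_natCast,
      pvRunsBwd_getD _ (i + 1) (by rw [pvCol_length]; omega)]
  have hrowE : (P.map pvRunsFwd).getD (i + 1) [] = pvRunsFwd (PySem.List.pyGetD P ((i + 1 : Nat) : Int) []) := by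
    rw [List.getD_eq_getElem _ [] (n := i + 1) (by simpa using by omega),
      List.getElem_map, PySem.List.pyGetD_natCast,
      List.getD_eq_getElem P [] (n := i + 1) (by omega)]
  have hrowE' : (P.map pvRunsBwd).getD (i + 1) [] = pvRunsBwd (PySem.List.pyGetD P ((i + 1 : Nat) : Int) []) := by
    rw [List.getD_eq_getElem _ [] (n := i + 1) (by simpa using by omega),
      List.getElem_map, PySem.List.pyGetD_natCast,
      List.getD_eq_getElem P [] (n := i + 1) (by omega)]
  have hrowlen : (PySem.List.pyGetD P ((i + 1 : Nat) : Int) []).length = g.length + 2 := by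
    apply pvPad_row g hsq
    rw [PySem.List.pyGetD_natCast, List.getD_eq_getElem P [] (n := i + 1) (by omega)]
    exact List.getElem_mem _
  have hleftE : PySem.List.pyGetD (PySem.List.pyGetD (P.map pvRunsFwd)
      ((i + 1 : Nat) : Int) []) ((j + 1 : Nat) : Int) 0
      = ((pvRunL (PySem.List.pyGetD P ((i + 1 : Nat) : Int) []) (j + 1) : Nat) : Int) := by
    rw [PySem.List.pyGetD_natCast (P.map pvRunsFwd), hrowE, PySem.List.pyGetD_natCast,
      pvRunsFwd_getD _ (j + 1) (by rw [hrowlen]; omega)]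
  have hrightE : PySem.List.pyGetD (PySem.List.pyGetD (P.map pvRunsBwd)
      ((i + 1 : Nat) : Int) []) ((j + 1 : Nat) : Int) 0
      = ((pvRunR (PySem.List.pyGetD P ((i + 1 : Nat) : Int) []) (j + 1) : Nat) : Int) := by
    rw [PySem.List.pyGetD_natCast (P.map pvRunsBwd), hrowE', PySem.List.pyGetD_natCast,
      pvRunsBwd_getD _ (j + 1) (by rw [hrowlen]; omega)]
  rw [hupE, hdownE, hleftE, hrightE]
  set au := pvRunL (pvCol P ((j + 1 : Nat) : Int)) (i + 1) with hau
  set ad := pvRunR (pvCol P ((j + 1 : Nat) : Int)) (i + 1) with had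
  set al := pvRunL (PySem.List.pyGetD P ((i + 1 : Nat) : Int) []) (j + 1) with hal
  set ar := pvRunR (PySem.List.pyGetD P ((i + 1 : Nat) : Int) []) (j + 1) with har
  have hcond1 : ((2 : Int) ≤ (au : Int) + (ad : Int)) ↔ (2 ≤ au + ad) := by
    constructor <;> intro h <;> [exact_mod_cast h; exact_mod_cast h]
  have hcond2 : ((2 : Int) ≤ (al : Int) + (ar : Int)) ↔ (2 ≤ al + ar) := by
    constructor <;> intro h <;> [exact_mod_cast h; exact_mod_cast h]
  simp only [hcond1, hcond2]
  rw [PySem.List.pyRange_zero_natCast au, PySem.List.pyRange_zero_natCast ad,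
    PySem.List.pyRange_zero_natCast al, PySem.List.pyRange_zero_natCast ar]
  simp only [List.map_map, Function.comp_def]
  simp only [pvBlock]
  rw [hcast1, hcast2, ← hP, ← hau, ← had, ← hal, ← har]

-- ===== VERDICT (by name: the statement is the Claim_ definition above) =====
theorem recherche_combinaison_grille_spec : Claim_equal_recherche_combinaison_grille := by
  intro g _hdom hpre
  have hsq : ∀ row ∈ g, row.length = g.length := hpre
  unfold Spec_recherche_combinaison_grille
  rw [pvA_stream g hsq, pvAlt_stream g hsq,
    pvDedup_eq (pvStream g) [] PySem.Set.empty (pvStream_pairs g)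
      (by intro a b; simp [PySem.Set.empty])]
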